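-- pv_equiv track=rewrite | github.com/paveleroshkinweb/algorithms | python-algorithms/src/problems/extra_long_factorial.py | concat_products
-- ===== SOURCE A (Python) =====
-- def concat_products(products):
--     concated_products = products[0]
--     for product in products[1:]:
--         len_diff = len(concated_products) - len(product)
--         array_to_normalize = concated_products if len_diff < 0 else product
--         array_to_normalize.extend(['0'] * abs(len_diff))
--         concated_products = sum_products(concated_products, product)
--     return ''.join(concated_products)[::-1]
--
-- def sum_products(product1, product2):
--     sum_array = []
--     addition = 0
--     for i in range(len(product1)):
--         number1, number2 = int(product1[i]), int(product2[i])
--         sum = number1 + number2 + addition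
--         addition = 0
--         if sum >= 10:
--             addition = sum // 10
--         sum_array.append(str(sum % 10))
--         if i == len(product1) - 1 and sum >= 10:
--             sum_array.append(str(addition))
--     return sum_array
-- ===== SOURCE B (Python) =====
-- def concat_products(products):
--     # A single number needs no addition: its digit array is already the answer.
--     if len(products) == 1:
--         return ''.join(products[0])[::-1]
--     length = max(len(p) for p in products)
--     digits = []
--     carry = 0
--     for i in range(length):
--         s = carry
--         for p in products:
--             if i < len(p):
--                 s += int(p[i])
--         digits.append(str(s % 10))
--         carry = s // 10
--     while carry:
--         digits.append(str(carry % 10))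
--         carry //= 10
--     return ''.join(digits)[::-1]
-- ===== Notes on version B (the rewrite author's own statement) =====
-- stated objective: alternative
-- what changed: B adds all numbers at once in a single column-wise pass (one carry chain over the whole list, carry flushed by a final while-loop), instead of A's n-1 pairwise schoolbook additions with in-place zero padding; B also never mutates its argument (A extends the inner lists via .extend), so equivalence is about the return value.
-- outside the precondition, e.g. on concat_products([['99'], ['99']]): A returns '918', B returns '198'
import Mathlib
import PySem

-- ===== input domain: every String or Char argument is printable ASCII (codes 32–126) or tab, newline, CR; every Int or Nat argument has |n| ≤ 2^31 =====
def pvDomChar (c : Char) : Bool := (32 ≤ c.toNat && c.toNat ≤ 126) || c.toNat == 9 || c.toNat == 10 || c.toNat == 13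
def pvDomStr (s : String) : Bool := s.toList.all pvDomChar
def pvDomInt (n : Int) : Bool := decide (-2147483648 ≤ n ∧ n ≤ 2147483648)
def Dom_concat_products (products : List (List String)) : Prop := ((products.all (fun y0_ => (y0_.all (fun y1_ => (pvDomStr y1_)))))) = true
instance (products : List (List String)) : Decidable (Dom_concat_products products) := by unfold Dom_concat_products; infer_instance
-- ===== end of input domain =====

-- B adds all the numbers at once in a single column-wise pass (one carry chain, flushed by a
-- final while-loop) instead of A's n-1 pairwise schoolbook additions with in-place zero
-- padding; equivalence is about the RETURN value only (A mutates its inner lists via .extend,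
-- B never mutates its argument).

-- ===== PORT A =====
-- int(s): PySem.Int.ofStr? = none is ValueError (Python A raises there; excluded by Pre_).
def sum_products_impl (product1 product2 : List String) : List String :=
  (((PySem.List.pyRange 0 (product1.length : Int) 1).foldl
    (fun (st : List String × Int) (i : Int) =>
      let number1 := (PySem.Int.ofStr? (PySem.List.pyGetD product1 i "")).getD 0
      let number2 := (PySem.Int.ofStr? (PySem.List.pyGetD product2 i "")).getD 0
      let s := number1 + number2 + st.2
      let addition : Int := if 10 ≤ s then PySem.Int.floordiv s 10 else 0
      let sum_array := st.1 ++ [PySem.Int.toStr (PySem.Int.mod s 10)]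
      let sum_array := if i = (product1.length : Int) - 1 ∧ 10 ≤ s then
          sum_array ++ [PySem.Int.toStr addition] else sum_array
      (sum_array, addition)) ([], 0)).1)

def concat_products (products : List (List String)) : String :=
  -- products[0]: IndexError on the empty outer list (excluded by Pre_)
  let cp0 := (PySem.List.pyGet? products 0).getD []
  let cp := (PySem.List.slice products (some 1) none).foldl
    (fun concated product =>
      let len_diff : Int := (concated.length : Int) - (product.length : Int)
      -- array_to_normalize.extend(['0'] * abs(len_diff)) — functionally: pad the shorter list
      let concated' := if len_diff < 0 then concated ++ List.replicate len_diff.natAbs "0" else concated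
      let product' := if len_diff < 0 then product else product ++ List.replicate len_diff.natAbs "0"
      sum_products_impl concated' product') cp0
  String.ofList (PySem.Str.join "" cp).toList.reverse  -- ''.join(cp)[::-1]

-- ===== PORT B =====
-- 'while carry:' — Python's test is carry ≠ 0, but for carry < 0 that Python loop never
-- terminates (carry //= 10 sticks at -1), so the port recurses exactly on 0 < carry; inside
-- Pre_ the carry is never negative, and there the port is exact.
def flush_carry (digits : List String) (carry : Int) : List String :=
  if h : 0 < carry then
    flush_carry (digits ++ [PySem.Int.toStr (PySem.Int.mod carry 10)]) (PySem.Int.floordiv carry 10)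
  else digits
termination_by carry.toNat
decreasing_by
  rw [PySem.Int.floordiv_eq_ediv_of_pos (by norm_num)]
  omega

def concat_products_alt (products : List (List String)) : String :=
  if products.length = 1 then
    -- a single number needs no addition
    String.ofList (PySem.Str.join "" ((PySem.List.pyGet? products 0).getD [])).toList.reverse
  else
    -- max(len(p) for p in products): ValueError on the empty outer list (excluded by Pre_)
    let length : Int := match products with
      | [] => 0
      | p0 :: rest => rest.foldl (fun m p => max m (p.length : Int)) (p0.length : Int)
    let st := (PySem.List.pyRange 0 length 1).foldl
      (fun (st : List String × Int) (i : Int) =>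
        let s := products.foldl
          (fun s p => if i < (p.length : Int) then
              s + (PySem.Int.ofStr? (PySem.List.pyGetD p i "")).getD 0 else s) st.2
        (st.1 ++ [PySem.Int.toStr (PySem.Int.mod s 10)], PySem.Int.floordiv s 10))
      ([], 0)
    String.ofList (PySem.Str.join "" (flush_carry st.1 st.2)).toList.reverse

-- ===== PRECONDITION & SPEC =====
-- Pre_ excludes the empty outer list (products[0] raises IndexError) and, when there are two
-- or more numbers, any entry that is not a single decimal-digit string: the function's domain
-- is big-number digit arrays, and on other entries (e.g. '99', '+5') A's value is an accident
-- of its pairwise carry handling (a multi-digit carry is appended as one element and garbled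
-- by the final reversal) while B's column sum is an equally accidental other value.
def Pre_concat_products (products : List (List String)) : Prop :=
  products ≠ [] ∧
  (products.length = 1 ∨ ∀ p ∈ products, ∀ s ∈ p,
    s ∈ ["0", "1", "2", "3", "4", "5", "6", "7", "8", "9"])
instance (products : List (List String)) : Decidable (Pre_concat_products products) := by
  unfold Pre_concat_products; infer_instance

def pvWitness_concat_products : List (List String) := [["2", "1"], ["9"], ["0", "3"]]

def Spec_concat_products (products : List (List String)) (out : String) : Prop := out = concat_products_alt products
instance (products : List (List String)) (out : String) : Decidable (Spec_concat_products products out) := by unfold Spec_concat_products; infer_instance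

-- ===== CLAIM (what is proved, stated in full; the proofs are below) =====
def Claim_equal_concat_products : Prop := ∀ (products : List (List String)), Dom_concat_products products → Pre_concat_products products → Spec_concat_products products (concat_products products)

-- ===== LEMMAS AND PROOFS =====

-- digit lists (little-endian), their values, and the canonical digit list of a value
def render (ds : List ℕ) : List String := ds.map (fun d : ℕ => PySem.Int.toStr (d : Int))

def valL : List ℕ → ℕ
  | [] => 0
  | d :: ds => d + 10 * valL ds

def canon (v w : ℕ) : List ℕ :=
  if h : v = 0 ∧ w = 0 then [] else v % 10 :: canon (v / 10) (w - 1)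
termination_by v + w
decreasing_by
  rw [not_and_or] at h
  rcases Nat.eq_zero_or_pos v with h0 | h0
  · omega
  · have hlt : v / 10 < v := Nat.div_lt_self h0 (by norm_num)
    omega

def dig (s : String) : ℕ := ((PySem.Int.ofStr? s).getD 0).toNat

def sumT (qs : List (List ℕ)) : ℕ := (qs.map valL).sum

def lenMax (L : ℕ) (qs : List (List ℕ)) : ℕ := qs.foldl (fun m q => max m q.length) L

def colSum (qs : List (List ℕ)) (i : ℕ) : ℕ := (qs.map (fun q => q.getD i 0)).sum

def colVal (qs : List (List ℕ)) (j : ℕ) : ℕ → ℕ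
  | 0 => 0
  | k + 1 => colSum qs j + 10 * colVal qs (j + 1) k

-- the outer-loop body of port A, named for the proofs
def AstepF (concated product : List String) : List String :=
  let len_diff : Int := (concated.length : Int) - (product.length : Int)
  let concated' := if len_diff < 0 then concated ++ List.replicate len_diff.natAbs "0" else concated
  let product' := if len_diff < 0 then product else product ++ List.replicate len_diff.natAbs "0"
  sum_products_impl concated' product'

theorem concat_products_unfold (products : List (List String)) :
    concat_products products
    = String.ofList (PySem.Str.join ""
        ((PySem.List.slice products (some 1) none).foldl AstepF
          ((PySem.List.pyGet? products 0).getD []))).toList.reverse := rfl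

theorem parse_digit (d : ℕ) (hd : d < 10) :
    PySem.Int.ofStr? (PySem.Int.toStr (d : Int)) = some (d : Int) := by
  interval_cases d <;> decide

theorem canon_unfold (v w : ℕ) (h : ¬(v = 0 ∧ w = 0)) :
    canon v w = v % 10 :: canon (v / 10) (w - 1) := by
  rw [canon, dif_neg h]

theorem canon_succ (v w : ℕ) : canon v (w + 1) = v % 10 :: canon (v / 10) w :=
  canon_unfold v (w + 1) (by omega)

theorem canon_zero (k : ℕ) : canon 0 k = List.replicate k 0 := by
  induction k with
  | zero => rw [canon]; simp
  | succ k ih => rw [canon_succ]; simp [ih, List.replicate_succ]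

theorem canon_valL (v w : ℕ) : valL (canon v w) = v := by
  induction v, w using canon.induct with
  | case1 v w h => obtain ⟨h1, h2⟩ := h; subst h1; subst h2; rw [canon]; simp [valL]
  | case2 v w h ih => rw [canon_unfold v w h, valL, ih]; omega

theorem canon_digits (v w : ℕ) : ∀ d ∈ canon v w, d < 10 := by
  induction v, w using canon.induct with
  | case1 v w h => obtain ⟨h1, h2⟩ := h; subst h1; subst h2; rw [canon]; simp
  | case2 v w h ih =>
    rw [canon_unfold v w h]
    intro d hd
    rcases List.mem_cons.mp hd with h' | h'
    · omega
    · exact ih d h'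

theorem canon_length (v : ℕ) : ∀ (w : ℕ), v < 10 ^ w → (canon v w).length = w := by
  induction v using Nat.strong_induction_on with
  | _ v ih =>
    intro w h
    match w with
    | 0 =>
      interval_cases v
      rw [canon]; simp
    | w + 1 =>
      rw [canon_succ]
      by_cases h0 : v = 0
      · subst h0; simp [canon_zero]
      · have hdiv : v / 10 < 10 ^ w := by
          rw [Nat.div_lt_iff_lt_mul (by norm_num)]
          rw [pow_succ] at h; omega
        have hv : v / 10 < v := Nat.div_lt_self (by omega) (by norm_num)
        simp [ih (v / 10) hv w hdiv]

theorem canon_pad (k : ℕ) : ∀ (w v : ℕ), v < 10 ^ w →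
    canon v (w + k) = canon v w ++ List.replicate k 0 := by
  intro w
  induction w with
  | zero =>
    intro v h
    interval_cases v
    simp [canon_zero]
  | succ w ih =>
    intro v h
    have hdiv : v / 10 < 10 ^ w := by
      rw [Nat.div_lt_iff_lt_mul (by norm_num)]
      rw [pow_succ] at h; omega
    have e : w + 1 + k = (w + k) + 1 := by omega
    rw [e, canon_succ, canon_succ, ih (v / 10) hdiv, List.cons_append]

theorem canon_of_digits (ds : List ℕ) (h : ∀ d ∈ ds, d < 10) :
    canon (valL ds) ds.length = ds := by
  induction ds with
  | nil => rw [valL]; simp [canon]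
  | cons d ds ih =>
    have hd : d < 10 := h d (List.mem_cons_self ..)
    rw [valL, List.length_cons, canon_succ]
    have e1 : (d + 10 * valL ds) % 10 = d := by omega
    have e2 : (d + 10 * valL ds) / 10 = valL ds := by omega
    rw [e1, e2, ih (fun x hx => h x (List.mem_cons_of_mem _ hx))]

theorem valL_lt (ds : List ℕ) (h : ∀ d ∈ ds, d < 10) : valL ds < 10 ^ ds.length := by
  induction ds with
  | nil => rw [valL]; simp
  | cons d ds ih =>
    have hd : d < 10 := h d (List.mem_cons_self ..)
    have hv := ih (fun x hx => h x (List.mem_cons_of_mem _ hx))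
    rw [valL, List.length_cons, pow_succ]
    omega

theorem canon_absorb : ∀ (w v : ℕ), 10 ^ w ≤ v → canon v (w + 1) = canon v w := by
  intro w
  induction w with
  | zero =>
    intro v h
    simp only [pow_zero] at h
    rw [canon_succ, canon_unfold v 0 (by omega)]
  | succ w ih =>
    intro v h
    have h10 : 10 ^ w ≤ v / 10 := by
      rw [Nat.le_div_iff_mul_le (by norm_num)]
      rw [pow_succ] at h; omega
    rw [canon_succ, show w + 1 = w + 1 from rfl, ih (v / 10) h10, ← canon_succ]

theorem canon_down (v : ℕ) : ∀ (k a : ℕ), 10 ^ (a + k) ≤ v → canon v (a + k + 1) = canon v a := by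
  intro k
  induction k with
  | zero => intro a h; rw [Nat.add_zero] at *; exact canon_absorb a v h
  | succ k ih =>
    intro a h
    have e : a + (k + 1) + 1 = (a + k + 1) + 1 := by omega
    have h' : 10 ^ (a + k + 1) ≤ v := by rw [show a + k + 1 = a + (k + 1) by omega]; exact h
    rw [e, canon_absorb (a + k + 1) v h', ih a
      (le_trans (Nat.pow_le_pow_right (by norm_num) (by omega)) h')]

theorem A_fold (xs : List ℕ) : ∀ (ys : List ℕ) (X Y : List String) (j : ℕ),
    X.length = j + xs.length → xs.length = ys.length → 1 ≤ xs.length →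
    (∀ d ∈ xs, d < 10) → (∀ d ∈ ys, d < 10) →
    X.drop j = render xs → Y.drop j = render ys →
    ∀ (acc : List String) (c : ℕ), c ≤ 1 →
    (((PySem.List.pyRange (j : Int) (X.length : Int) 1).foldl
      (fun (st : List String × Int) (i : Int) =>
        let number1 := (PySem.Int.ofStr? (PySem.List.pyGetD X i "")).getD 0
        let number2 := (PySem.Int.ofStr? (PySem.List.pyGetD Y i "")).getD 0
        let s := number1 + number2 + st.2
        let addition : Int := if 10 ≤ s then PySem.Int.floordiv s 10 else 0
        let sum_array := st.1 ++ [PySem.Int.toStr (PySem.Int.mod s 10)]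
        let sum_array := if i = (X.length : Int) - 1 ∧ 10 ≤ s then
            sum_array ++ [PySem.Int.toStr addition] else sum_array
        (sum_array, addition)) (acc, (c : Int))).1)
    = acc ++ render (canon (valL xs + valL ys + c) xs.length) := by
  induction xs with
  | nil => intro ys X Y j _ _ h1 _ _ _ _ _ _ _; simp at h1
  | cons x xs ih =>
    intro ys X Y j hXlen hlen h1 hxd hyd hXd hYd acc c hc
    cases ys with
    | nil => simp at hlen
    | cons y ys =>
    have hlen' : xs.length = ys.length := by simpa using hlen
    have hx10 : x < 10 := hxd x (List.mem_cons_self ..)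
    have hy10 : y < 10 := hyd y (List.mem_cons_self ..)
    have hjX : j < X.length := by rw [hXlen]; simp only [List.length_cons]; omega
    have hXget : PySem.List.pyGetD X ((j : ℕ) : Int) "" = PySem.Int.toStr ((x : ℕ) : Int) := by
      rw [PySem.List.pyGetD_natCast]
      have h0 : (X.drop j)[0]? = X[j + 0]? := by rw [List.getElem?_drop]
      rw [hXd] at h0
      simp only [render, List.map_cons, List.getElem?_cons_zero, Nat.add_zero] at h0
      rw [List.getD_eq_getElem?_getD, ← h0]
      rfl
    have hYget : PySem.List.pyGetD Y ((j : ℕ) : Int) "" = PySem.Int.toStr ((y : ℕ) : Int) := by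
      rw [PySem.List.pyGetD_natCast]
      have h0 : (Y.drop j)[0]? = Y[j + 0]? := by rw [List.getElem?_drop]
      rw [hYd] at h0
      simp only [render, List.map_cons, List.getElem?_cons_zero, Nat.add_zero] at h0
      rw [List.getD_eq_getElem?_getD, ← h0]
      rfl
    have hcons : PySem.List.pyRange ((j : ℕ) : Int) ((X.length : ℕ) : Int) 1
        = ((j : ℕ) : Int) :: PySem.List.pyRange (((j : ℕ) : Int) + 1) ((X.length : ℕ) : Int) 1 :=
      PySem.List.pyRange_one_cons (by exact_mod_cast hjX)
    rw [hcons, List.foldl_cons]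
    have hbeta :
        (let number1 := (PySem.Int.ofStr? (PySem.List.pyGetD X ((j : ℕ) : Int) "")).getD 0
         let number2 := (PySem.Int.ofStr? (PySem.List.pyGetD Y ((j : ℕ) : Int) "")).getD 0
         let s := number1 + number2 + (acc, ((c : ℕ) : Int)).2
         let addition : Int := if 10 ≤ s then PySem.Int.floordiv s 10 else 0
         let sum_array := (acc, ((c : ℕ) : Int)).1 ++ [PySem.Int.toStr (PySem.Int.mod s 10)]
         let sum_array := if ((j : ℕ) : Int) = (X.length : Int) - 1 ∧ 10 ≤ s then
             sum_array ++ [PySem.Int.toStr addition] else sum_array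
         ((sum_array, addition) : List String × Int))
        = (let s := (PySem.Int.ofStr? (PySem.List.pyGetD X ((j : ℕ) : Int) "")).getD 0
              + (PySem.Int.ofStr? (PySem.List.pyGetD Y ((j : ℕ) : Int) "")).getD 0 + ((c : ℕ) : Int)
           (if ((j : ℕ) : Int) = (X.length : Int) - 1 ∧ 10 ≤ s then
              (acc ++ [PySem.Int.toStr (PySem.Int.mod s 10)])
                ++ [PySem.Int.toStr (if 10 ≤ s then PySem.Int.floordiv s 10 else 0)]
            else acc ++ [PySem.Int.toStr (PySem.Int.mod s 10)],
            if 10 ≤ s then PySem.Int.floordiv s 10 else 0)) := rfl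
    rw [hbeta]
    simp only [hXget, hYget, parse_digit x hx10, parse_digit y hy10, Option.getD_some]
    have hs : ((x : ℕ) : Int) + ((y : ℕ) : Int) + ((c : ℕ) : Int) = ((x + y + c : ℕ) : Int) := by
      push_cast; ring
    rw [hs]
    have hmod : PySem.Int.mod ((x + y + c : ℕ) : Int) 10 = (((x + y + c) % 10 : ℕ) : Int) := by
      exact_mod_cast PySem.Int.mod_natCast (x + y + c) 10
    have hadd : (if (10 : Int) ≤ ((x + y + c : ℕ) : Int)
          then PySem.Int.floordiv ((x + y + c : ℕ) : Int) 10 else 0)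
        = (((x + y + c) / 10 : ℕ) : Int) := by
      by_cases h10 : 10 ≤ x + y + c
      · rw [if_pos (by exact_mod_cast h10)]
        exact_mod_cast PySem.Int.floordiv_natCast (x + y + c) 10
      · rw [if_neg (by exact_mod_cast h10)]
        have e : (x + y + c) / 10 = 0 := by omega
        rw [e]; rfl
    rw [hmod, hadd]
    cases xs with
    | nil =>
      cases ys with
      | cons y' ys' => simp at hlen'
      | nil =>
      have hXj : X.length = j + 1 := by simpa using hXlen
      have hlast : ((j : ℕ) : Int) = (X.length : Int) - 1 := by rw [hXj]; push_cast; omega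
      have hnil : PySem.List.pyRange (((j : ℕ) : Int) + 1) ((X.length : ℕ) : Int) 1 = [] :=
        PySem.List.pyRange_one_eq_nil (by rw [hXj]; push_cast; omega)
      have hval : valL [x] + valL [y] + c = x + y + c := by simp [valL]
      by_cases h10 : 10 ≤ x + y + c
      · rw [if_pos ⟨hlast, by exact_mod_cast h10⟩, hnil, List.foldl_nil]
        have hd1 : (x + y + c) / 10 = 1 := by omega
        have hcanon : canon (x + y + c) 1 = [(x + y + c) % 10, 1] := by
          rw [canon_succ, hd1, canon_unfold 1 0 (by omega)]
          norm_num
          rw [canon]; simp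
        rw [hval, List.length_singleton, hcanon]
        simp [render, hd1]
      · rw [if_neg (fun hh => h10 (by exact_mod_cast hh.2)), hnil, List.foldl_nil]
        have hd0 : (x + y + c) / 10 = 0 := by omega
        have hcanon : canon (x + y + c) 1 = [(x + y + c) % 10] := by
          rw [canon_succ, hd0, canon_zero]
          rfl
        rw [hval, List.length_singleton, hcanon]
        simp [render]
    | cons x' xs' =>
      cases ys with
      | nil => simp at hlen'
      | cons y' ys' =>
      have hnotlast : ¬(((j : ℕ) : Int) = (X.length : Int) - 1 ∧
          10 ≤ ((x + y + c : ℕ) : Int)) := by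
        rintro ⟨he, -⟩
        rw [hXlen] at he
        simp at he
        omega
      rw [if_neg hnotlast]
      have hstep : ((j : ℕ) : Int) + 1 = (((j + 1 : ℕ)) : Int) := by push_cast; ring
      rw [hstep]
      have ihx := ih (y' :: ys') X Y (j + 1)
        (by rw [hXlen]; simp; omega) (by simpa using hlen') (by simp)
        (fun d hd => hxd d (List.mem_cons_of_mem _ hd))
        (fun d hd => hyd d (List.mem_cons_of_mem _ hd))
        (by rw [← List.tail_drop, hXd]; rfl)
        (by rw [← List.tail_drop, hYd]; rfl)
        (acc ++ [PySem.Int.toStr (((x + y + c) % 10 : ℕ) : Int)])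
        ((x + y + c) / 10) (by omega)
      rw [ihx]
      have hcanon : canon (valL (x :: x' :: xs') + valL (y :: y' :: ys') + c)
            ((x :: x' :: xs').length)
          = ((x + y + c) % 10)
            :: canon (valL (x' :: xs') + valL (y' :: ys') + (x + y + c) / 10)
                ((x' :: xs').length) := by
        have hv : valL (x :: x' :: xs') + valL (y :: y' :: ys') + c
            = (x + y + c) + 10 * (valL (x' :: xs') + valL (y' :: ys')) := by
          simp [valL]; ring
        rw [List.length_cons, canon_succ, hv]
        congr 1
        · omega
        · congr 1
          omega
      rw [hcanon]
      simp [render]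

theorem valL_append_zeros (l : List ℕ) : ∀ (k : ℕ), valL (l ++ List.replicate k 0) = valL l := by
  induction l with
  | nil =>
    intro k
    induction k with
    | zero => rfl
    | succ k ih => simpa [valL, List.replicate_succ] using ih
  | cons d l ih => intro k; simp only [List.cons_append, valL, ih]

theorem render_append_zeros (l : List ℕ) (k : ℕ) :
    render l ++ List.replicate k "0" = render (l ++ List.replicate k 0) := by
  simp only [render, List.map_append, List.map_replicate]
  congr 1

theorem sum_impl_eq (X Y : List String) (xs ys : List ℕ) (m : ℕ)
    (hm : 1 ≤ m) (hxl : xs.length = m) (hyl : ys.length = m)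
    (hX : X = render xs) (hY : Y = render ys)
    (hxd : ∀ d ∈ xs, d < 10) (hyd : ∀ d ∈ ys, d < 10) :
    sum_products_impl X Y = render (canon (valL xs + valL ys) m) := by
  have hXl : X.length = 0 + xs.length := by rw [hX]; simp [render]
  have h := A_fold xs ys X Y 0 hXl (by omega) (by omega) hxd hyd
    (by rw [List.drop_zero, hX]) (by rw [List.drop_zero, hY]) [] 0 (by omega)
  rw [Nat.cast_zero, List.nil_append, Nat.add_zero, hxl] at h
  unfold sum_products_impl
  exact h

theorem A_step (v w : ℕ) (hv : v < 10 ^ w) (q : List ℕ) (hq : ∀ d ∈ q, d < 10) :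
    AstepF (render (canon v w)) (render q)
    = render (canon (v + valL q)
        (if v + valL q < 10 ^ max w q.length then max w q.length else max w q.length + 1)) := by
  have hlenc : (render (canon v w)).length = w := by
    simp [render, canon_length v w hv]
  have hlenq : (render q).length = q.length := by simp [render]
  by_cases hm0 : max w q.length = 0
  · -- both empty: w = 0, q = []
    have hw0 : w = 0 := by omega
    have hq0 : q = [] := List.eq_nil_of_length_eq_zero (by omega)
    subst hw0; subst hq0
    have hv0 : v = 0 := by simpa using hv
    subst hv0
    unfold AstepF
    rw [hm0]
    simp only [canon_zero, List.replicate_zero, render, List.map_nil]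
    norm_num
    unfold sum_products_impl
    rw [PySem.List.pyRange_one_eq_nil (by norm_num), List.foldl_nil]
    rw [show valL [] = 0 from rfl, canon]
    simp
  · unfold AstepF
    simp only [hlenc, hlenq]
    by_cases hlt : w < q.length
    · have hdiff : ((w : ℕ) : Int) - ((q.length : ℕ) : Int) < 0 := by
        push_cast; omega
      rw [if_pos hdiff, if_pos hdiff]
      have habs : (((w : ℕ) : Int) - ((q.length : ℕ) : Int)).natAbs = q.length - w := by
        omega
      rw [habs, render_append_zeros, ← canon_pad (q.length - w) w v hv,
        show w + (q.length - w) = q.length by omega]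
      have hmax : max w q.length = q.length := by omega
      have hvm : v < 10 ^ q.length :=
        lt_of_lt_of_le hv (Nat.pow_le_pow_right (by norm_num) (by omega))
      rw [sum_impl_eq _ _ (canon v q.length) q q.length (by omega)
        (canon_length v q.length hvm) rfl rfl rfl
        (canon_digits v q.length) hq, canon_valL]
      rw [hmax]
      by_cases hov : v + valL q < 10 ^ q.length
      · rw [if_pos hov]
      · rw [if_neg hov, canon_absorb q.length (v + valL q) (by omega)]
    · have hdiff : ¬(((w : ℕ) : Int) - ((q.length : ℕ) : Int) < 0) := by
        push_cast; omega
      rw [if_neg hdiff, if_neg hdiff]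
      have habs : (((w : ℕ) : Int) - ((q.length : ℕ) : Int)).natAbs = w - q.length := by
        omega
      have hmax : max w q.length = w := by omega
      rw [habs, render_append_zeros]
      rw [sum_impl_eq _ _ (canon v w) (q ++ List.replicate (w - q.length) 0) w (by omega)
        (canon_length v w hv) (by simp; omega) rfl rfl (canon_digits v w)
        (by intro d hd
            rcases List.mem_append.mp hd with h | h
            · exact hq d h
            · rw [List.eq_of_mem_replicate h]; omega),
        canon_valL, valL_append_zeros]
      rw [hmax]
      by_cases hov : v + valL q < 10 ^ w
      · rw [if_pos hov]
      · rw [if_neg hov, canon_absorb w (v + valL q) (by omega)]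

theorem A_outer : ∀ (qs : List (List ℕ)), (∀ q ∈ qs, ∀ d ∈ q, d < 10) →
    ∀ (v w L : ℕ), v < 10 ^ w → L ≤ w → (10 ^ (w - 1) ≤ v ∨ w = L) →
    ∃ w', lenMax L qs ≤ w' ∧ v + sumT qs < 10 ^ w' ∧
      (10 ^ (w' - 1) ≤ v + sumT qs ∨ w' = lenMax L qs) ∧
      (qs.map render).foldl AstepF (render (canon v w)) = render (canon (v + sumT qs) w') := by
  intro qs
  induction qs with
  | nil =>
    intro _ v w L hv hL hor
    refine ⟨w, ?_, ?_, ?_, ?_⟩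
    · simpa [lenMax] using hL
    · simpa [sumT] using hv
    · simpa [sumT, lenMax] using hor
    · simp [sumT]
  | cons q qs ih =>
    intro hdig v w L hv hL hor
    have hqd : ∀ d ∈ q, d < 10 := hdig q (List.mem_cons_self ..)
    have hdig' : ∀ q' ∈ qs, ∀ d ∈ q', d < 10 := fun q' h => hdig q' (List.mem_cons_of_mem _ h)
    set m := max w q.length with hm
    set v' := v + valL q with hv'
    set W : ℕ := if v' < 10 ^ m then m else m + 1 with hW
    have hstep := A_step v w hv q hqd
    have hvW : v' < 10 ^ W := by
      rw [hW]
      by_cases hc : v' < 10 ^ m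
      · rwa [if_pos hc]
      · rw [if_neg hc]
        have hvq : valL q < 10 ^ q.length := valL_lt q hqd
        have h1 : v < 10 ^ m := lt_of_lt_of_le hv
          (Nat.pow_le_pow_right (by norm_num) (by omega))
        have h2 : valL q < 10 ^ m := lt_of_lt_of_le hvq
          (Nat.pow_le_pow_right (by norm_num) (by omega))
        rw [pow_succ]
        omega
    have hLW : max L q.length ≤ W := by
      rw [hW]
      split_ifs <;> omega
    have horW : 10 ^ (W - 1) ≤ v' ∨ W = max L q.length := by
      rw [hW]
      by_cases hc : v' < 10 ^ m
      · rw [if_pos hc]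
        rcases hor with h | h
        · by_cases hmw : m = w
          · left
            rw [hmw] at *
            omega
          · right
            omega
        · right
          omega
      · rw [if_neg hc]
        left
        simpa using Nat.le_of_not_lt hc
    obtain ⟨w', h1, h2, h3, h4⟩ := ih hdig' v' W (max L q.length) hvW hLW horW
    have hsum : sumT (q :: qs) = valL q + sumT qs := by simp [sumT]
    have hlm : lenMax L (q :: qs) = lenMax (max L q.length) qs := rfl
    refine ⟨w', ?_, ?_, ?_, ?_⟩
    · rwa [hlm]
    · rw [hsum]; omega
    · rw [hlm, hsum, show v + (valL q + sumT qs) = v' + sumT qs by omega]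
      exact h3
    · rw [List.map_cons, List.foldl_cons, hstep, ← hm, ← hv', ← hW, h4, hsum]
      congr 2
      omega

theorem flush_eq (c : ℕ) : ∀ (acc : List String),
    flush_carry acc ((c : ℕ) : Int) = acc ++ render (canon c 0) := by
  induction c using Nat.strong_induction_on with
  | _ c ih =>
    intro acc
    by_cases h0 : c = 0
    · subst h0
      rw [flush_carry]
      simp [canon_zero, render]
    · have e1 : PySem.Int.mod ((c : ℕ) : Int) 10 = ((c % 10 : ℕ) : Int) := by
        exact_mod_cast PySem.Int.mod_natCast c 10
      have e2 : PySem.Int.floordiv ((c : ℕ) : Int) 10 = ((c / 10 : ℕ) : Int) := by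
        exact_mod_cast PySem.Int.floordiv_natCast c 10
      rw [flush_carry, dif_pos (by exact_mod_cast Nat.pos_of_ne_zero h0), e1, e2,
        ih (c / 10) (Nat.div_lt_self (by omega) (by norm_num)),
        canon_unfold c 0 (by omega)]
      simp [render]

theorem B_inner (qs : List (List ℕ)) (hq : ∀ q ∈ qs, ∀ d ∈ q, d < 10) (i : ℕ) (c : Int) :
    (qs.map render).foldl
      (fun s p => if ((i : ℕ) : Int) < (p.length : Int) then
          s + (PySem.Int.ofStr? (PySem.List.pyGetD p ((i : ℕ) : Int) "")).getD 0 else s) c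
    = c + ((colSum qs i : ℕ) : Int) := by
  induction qs generalizing c with
  | nil => simp [colSum]
  | cons q qs ih =>
    have hq' : ∀ q' ∈ qs, ∀ d ∈ q', d < 10 := fun q' h => hq q' (List.mem_cons_of_mem _ h)
    have hcs : colSum (q :: qs) i = q.getD i 0 + colSum qs i := by simp [colSum]
    have hlen : ((render q).length : Int) = (q.length : Int) := by simp [render]
    simp only [List.map_cons, List.foldl_cons]
    by_cases hi : i < q.length
    · rw [if_pos (by rw [hlen]; exact_mod_cast hi)]
      have hget : PySem.List.pyGetD (render q) ((i : ℕ) : Int) ""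
          = PySem.Int.toStr ((q.getD i 0 : ℕ) : Int) := by
        rw [PySem.List.pyGetD_natCast,
          List.getD_eq_getElem _ _ (show i < (render q).length by simpa [render] using hi),
          List.getD_eq_getElem _ _ hi]
        simp only [render]
        rw [List.getElem_map]
      have hd : q.getD i 0 < 10 := by
        rw [List.getD_eq_getElem _ _ hi]
        exact hq q (List.mem_cons_self ..) _ (List.getElem_mem _)
      rw [hget, parse_digit _ hd]
      simp only [Option.getD_some]
      rw [ih hq' _, hcs]
      push_cast; ring
    · rw [if_neg (by rw [hlen]; exact_mod_cast hi), ih hq' c, hcs,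
        List.getD_eq_default _ _ (by omega)]
      push_cast; ring

theorem B_main (qs : List (List ℕ)) (hq : ∀ q ∈ qs, ∀ d ∈ q, d < 10) (L : ℕ) :
    ∀ (k : ℕ), k ≤ L → ∀ (acc : List String) (c : ℕ),
    (let st := (PySem.List.pyRange (((L - k : ℕ)) : Int) ((L : ℕ) : Int) 1).foldl
      (fun (st : List String × Int) (i : Int) =>
        let s := (qs.map render).foldl
          (fun s p => if i < (p.length : Int) then
              s + (PySem.Int.ofStr? (PySem.List.pyGetD p i "")).getD 0 else s) st.2
        (st.1 ++ [PySem.Int.toStr (PySem.Int.mod s 10)], PySem.Int.floordiv s 10))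
      (acc, (c : Int))
     flush_carry st.1 st.2)
    = acc ++ render (canon (colVal qs (L - k) k + c) k) := by
  intro k
  induction k with
  | zero =>
    intro _ acc c
    rw [Nat.sub_zero, PySem.List.pyRange_one_eq_nil (le_refl _), List.foldl_nil]
    simp only []
    rw [flush_eq c acc, colVal, Nat.zero_add]
  | succ k ih =>
    intro hk acc c
    set j : ℕ := L - (k + 1) with hj
    have hcons : PySem.List.pyRange ((j : ℕ) : Int) ((L : ℕ) : Int) 1
        = ((j : ℕ) : Int) :: PySem.List.pyRange (((j : ℕ) : Int) + 1) ((L : ℕ) : Int) 1 :=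
      PySem.List.pyRange_one_cons (by exact_mod_cast Nat.sub_lt (by omega) (by omega))
    rw [hcons, List.foldl_cons]
    simp only []
    rw [B_inner qs hq j ((c : ℕ) : Int)]
    have hV : ((c : ℕ) : Int) + ((colSum qs j : ℕ) : Int) = ((c + colSum qs j : ℕ) : Int) :=
      (Nat.cast_add c (colSum qs j)).symm
    have e1 : PySem.Int.mod (((c + colSum qs j : ℕ)) : Int) 10
        = (((c + colSum qs j) % 10 : ℕ) : Int) := by
      exact_mod_cast PySem.Int.mod_natCast (c + colSum qs j) 10
    have e2 : PySem.Int.floordiv (((c + colSum qs j : ℕ)) : Int) 10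
        = (((c + colSum qs j) / 10 : ℕ) : Int) := by
      exact_mod_cast PySem.Int.floordiv_natCast (c + colSum qs j) 10
    rw [hV, e1, e2]
    have estep : ((j : ℕ) : Int) + 1 = ((L - k : ℕ) : Int) := by push_cast; omega
    rw [estep, ih (by omega) (acc ++ [PySem.Int.toStr (((c + colSum qs j) % 10 : ℕ) : Int)])
      ((c + colSum qs j) / 10)]
    have hjk : j + 1 = L - k := by omega
    have hcanon : canon (colVal qs j (k + 1) + c) (k + 1)
        = ((c + colSum qs j) % 10)
          :: canon (colVal qs (L - k) k + (c + colSum qs j) / 10) k := by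
      rw [canon_succ, colVal, ← hjk]
      congr 1
      · omega
      · congr 1
        omega
    rw [hcanon]
    simp [render]

theorem sum_split (qs : List (List ℕ)) (f g : List ℕ → ℕ) :
    (qs.map (fun q => f q + 10 * g q)).sum = (qs.map f).sum + 10 * (qs.map g).sum := by
  induction qs with
  | nil => simp
  | cons q qs ih => simp [ih]; ring

theorem valL_drop (q : List ℕ) : ∀ (j : ℕ),
    valL (q.drop j) = q.getD j 0 + 10 * valL (q.drop (j + 1)) := by
  induction q with
  | nil => intro j; simp [valL]
  | cons x t ih =>
    intro j
    match j with
    | 0 => simp [valL]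
    | j + 1 =>
      simp only [List.drop_succ_cons, List.getD_cons_succ]
      exact ih j

theorem colVal_sum (qs : List (List ℕ)) : ∀ (k j : ℕ), (∀ q ∈ qs, q.length ≤ j + k) →
    colVal qs j k = (qs.map (fun q => valL (q.drop j))).sum := by
  intro k
  induction k with
  | zero =>
    intro j h
    rw [colVal]
    symm
    apply List.sum_eq_zero
    intro x hx
    rcases List.mem_map.mp hx with ⟨q, hq, he⟩
    rw [List.drop_eq_nil_of_le (by have := h q hq; omega)] at he
    rw [← he]; rfl
  | succ k ih =>
    intro j h
    rw [colVal, ih (j + 1) (fun q hq => by have := h q hq; omega)]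
    have : (qs.map (fun q => valL (q.drop j))).sum
        = (qs.map (fun q => q.getD j 0 + 10 * valL (q.drop (j + 1)))).sum := by
      congr 1
      apply List.map_congr_left
      intro q _
      exact valL_drop q j
    rw [this, sum_split qs (fun q => q.getD j 0) (fun q => valL (q.drop (j + 1)))]
    rfl

theorem lenMax_le (qs : List (List ℕ)) : ∀ (L : ℕ), L ≤ lenMax L qs := by
  induction qs with
  | nil => intro L; simp [lenMax]
  | cons q qs ih =>
    intro L
    have h := ih (max L q.length)
    simp only [lenMax, List.foldl_cons] at *
    omega

theorem lenMax_mem (qs : List (List ℕ)) : ∀ (L : ℕ) (q : List ℕ), q ∈ qs → q.length ≤ lenMax L qs := by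
  induction qs with
  | nil => intro L q h; simp at h
  | cons p qs ih =>
    intro L q hq
    rcases List.mem_cons.mp hq with h | h
    · subst h
      have := lenMax_le qs (max L q.length)
      simp only [lenMax, List.foldl_cons] at *
      omega
    · exact ih (max L p.length) q h

theorem maxFold_cast (qs : List (List ℕ)) : ∀ (L : ℕ),
    (qs.map render).foldl (fun m p => max m (p.length : Int)) ((L : ℕ) : Int)
    = ((lenMax L qs : ℕ) : Int) := by
  induction qs with
  | nil => intro L; simp [lenMax]
  | cons q qs ih =>
    intro L
    have hlen : (render q).length = q.length := by simp [render]
    simp only [List.map_cons, List.foldl_cons, lenMax]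
    rw [hlen, show max ((L : ℕ) : Int) ((q.length : ℕ) : Int) = ((max L q.length : ℕ) : Int) by
      push_cast; rfl]
    exact ih (max L q.length)

theorem digit_roundtrip (s : String)
    (h : s ∈ ["0", "1", "2", "3", "4", "5", "6", "7", "8", "9"]) :
    PySem.Int.toStr ((dig s : ℕ) : Int) = s ∧ dig s < 10 := by
  fin_cases h <;> exact ⟨by decide, by decide⟩

-- ===== VERDICT (by name: the statement is the Claim_ definition above) =====
theorem render_map_dig (p : List String)
    (h : ∀ s ∈ p, s ∈ ["0", "1", "2", "3", "4", "5", "6", "7", "8", "9"]) :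
    render (p.map dig) = p := by
  rw [render, List.map_map]
  conv_rhs => rw [← List.map_id p]
  apply List.map_congr_left
  intro s hs
  exact (digit_roundtrip s (h s hs)).1

theorem concat_products_spec : Claim_equal_concat_products := by
  unfold Claim_equal_concat_products
  intro products _ hpre
  obtain ⟨hne, hdig⟩ := hpre
  unfold Spec_concat_products
  rcases products with _ | ⟨p0, rest⟩
  · exact absurd rfl hne
  by_cases h1 : (p0 :: rest).length = 1
  · -- a single number: both sides return join(products[0]) reversed
    have hrest : rest = [] := by
      simp only [List.length_cons] at h1
      exact List.eq_nil_of_length_eq_zero (by omega)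
    subst hrest
    rw [concat_products_unfold, concat_products_alt, if_pos h1, PySem.List.slice_from_one]
    rfl
  · -- two or more numbers: all entries are single decimal digits
    have hdigs : ∀ p ∈ p0 :: rest, ∀ s ∈ p,
        s ∈ ["0", "1", "2", "3", "4", "5", "6", "7", "8", "9"] := hdig.resolve_left h1
    set q0 : List ℕ := p0.map dig with hq0
    set qs' : List (List ℕ) := rest.map (fun p => p.map dig) with hqs'
    have hp0 : p0 = render q0 :=
      (render_map_dig p0 (hdigs p0 (List.mem_cons_self ..))).symm
    have hrest : rest = qs'.map render := by
      rw [hqs', List.map_map]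
      conv_lhs => rw [← List.map_id rest]
      apply List.map_congr_left
      intro p hp
      exact (render_map_dig p (hdigs p (List.mem_cons_of_mem _ hp))).symm
    have hd0 : ∀ d ∈ q0, d < 10 := by
      intro d hd
      obtain ⟨s, hs, rfl⟩ := List.mem_map.mp hd
      exact (digit_roundtrip s (hdigs p0 (List.mem_cons_self ..) s hs)).2
    have hd' : ∀ q ∈ qs', ∀ d ∈ q, d < 10 := by
      intro q hq d hd
      obtain ⟨p, hp, rfl⟩ := List.mem_map.mp hq
      obtain ⟨s, hs, rfl⟩ := List.mem_map.mp hd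
      exact (digit_roundtrip s (hdigs p (List.mem_cons_of_mem _ hp) s hs)).2
    have hdd : ∀ q ∈ q0 :: qs', ∀ d ∈ q, d < 10 := by
      intro q hq
      rcases List.mem_cons.mp hq with h | h
      · subst h; exact hd0
      · exact hd' q h
    set Lm : ℕ := lenMax q0.length qs' with hLm
    set T : ℕ := valL q0 + sumT qs' with hT
    -- A side
    obtain ⟨w', hw1, hw2, hw3, hfold⟩ := A_outer qs' hd' (valL q0) q0.length q0.length
      (valL_lt q0 hd0) (le_refl _) (Or.inr rfl)
    have hAlist : (PySem.List.slice (p0 :: rest) (some 1) none).foldl AstepF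
        ((PySem.List.pyGet? (p0 :: rest) 0).getD []) = render (canon T w') := by
      rw [PySem.List.slice_from_one]
      have hget : (PySem.List.pyGet? (p0 :: rest) 0).getD [] = p0 := by
        simp [PySem.List.pyGet?, PySem.List.pyIdx?]
      show rest.foldl AstepF ((PySem.List.pyGet? (p0 :: rest) 0).getD []) = _
      rw [hget, hrest, hp0]
      rw [show render q0 = render (canon (valL q0) q0.length) by
        rw [canon_of_digits q0 hd0]]
      exact hfold
    -- B side
    have hBlen : rest.foldl (fun m p => max m (p.length : Int)) ((p0.length : ℕ) : Int)
        = ((Lm : ℕ) : Int) := by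
      rw [hrest, show p0.length = q0.length by rw [hp0]; simp [render]]
      exact maxFold_cast qs' q0.length
    have hlenq : ∀ q ∈ q0 :: qs', q.length ≤ 0 + Lm := by
      intro q hq
      rcases List.mem_cons.mp hq with h | h
      · subst h; rw [Nat.zero_add, hLm]; exact lenMax_le qs' q0.length
      · rw [Nat.zero_add, hLm]; exact lenMax_mem qs' q0.length q h
    have hcv : colVal (q0 :: qs') 0 Lm = T := by
      rw [colVal_sum (q0 :: qs') Lm 0 hlenq]
      have e : List.map (fun q => valL (q.drop 0)) (q0 :: qs') = List.map valL (q0 :: qs') := by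
        apply List.map_congr_left
        intro q _
        rw [List.drop_zero]
      rw [e, List.map_cons, List.sum_cons, hT, sumT]
    have hB := B_main (q0 :: qs') hdd Lm Lm (le_refl _) [] 0
    rw [Nat.sub_self, Nat.cast_zero, List.nil_append, Nat.add_zero, hcv] at hB
    -- the two canonical digit lists agree
    have hcanon : canon T w' = canon T Lm := by
      rcases hw3 with h | h
      · rcases Nat.lt_or_ge Lm w' with hlt | hge
        · have := canon_down T (w' - Lm - 1) Lm
            (by rw [show Lm + (w' - Lm - 1) = w' - 1 by omega]; exact h)
          rwa [show Lm + (w' - Lm - 1) + 1 = w' by omega] at this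
        · have : w' = Lm := by omega
          rw [this]
      · rw [h]
    have halt : concat_products_alt (p0 :: rest)
        = (let length : Int := rest.foldl (fun m p => max m (p.length : Int)) (p0.length : Int)
           let st := (PySem.List.pyRange 0 length 1).foldl
             (fun (st : List String × Int) (i : Int) =>
               let s := (p0 :: rest).foldl
                 (fun s p => if i < (p.length : Int) then
                     s + (PySem.Int.ofStr? (PySem.List.pyGetD p i "")).getD 0 else s) st.2
               (st.1 ++ [PySem.Int.toStr (PySem.Int.mod s 10)], PySem.Int.floordiv s 10))
             ([], 0)
           String.ofList (PySem.Str.join "" (flush_carry st.1 st.2)).toList.reverse) := by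
      rw [concat_products_alt, if_neg h1]
    rw [concat_products_unfold, hAlist, halt, hBlen,
      show (p0 :: rest : List (List String)) = (q0 :: qs').map render from by
        rw [List.map_cons, ← hp0, ← hrest],
      hcanon, ← hB]
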